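-- pv_equiv track=rewrite | github.com/shortalex12333/Cloud_PMS | api/sql_foundation/action_algebra.py | _extract_object
-- ===== SOURCE A (Python) =====
-- from typing import List, Dict, Set, Optional, Tuple, Any, Union
-- from enum import Enum
--
-- class ActionObject(str, Enum):
--     """
--     Objects that actions can operate on.
--
--     Each maps to one or more database tables.
--     """
--     INVENTORY = "inventory"
--     WORK_ORDERS = "work_orders"
--     EQUIPMENT = "equipment"
--     PARTS = "parts"
--     FAULTS = "faults"
--     DOCUMENTS = "documents"
--     PURCHASE_ORDERS = "purchase_orders"
--     SUPPLIERS = "suppliers"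
--     LOGS = "logs"
--
-- OBJECT_PATTERNS: Dict[str, ActionObject] = {
--     # INVENTORY
--     "inventory": ActionObject.INVENTORY,
--     "inv": ActionObject.INVENTORY,
--     "stock": ActionObject.INVENTORY,
--     "spare": ActionObject.INVENTORY,
--     "spares": ActionObject.INVENTORY,
--
--     # WORK_ORDERS
--     "work order": ActionObject.WORK_ORDERS,
--     "work orders": ActionObject.WORK_ORDERS,
--     "wo": ActionObject.WORK_ORDERS,
--     "task": ActionObject.WORK_ORDERS,
--     "tasks": ActionObject.WORK_ORDERS,
--     "job": ActionObject.WORK_ORDERS,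
--     "jobs": ActionObject.WORK_ORDERS,
--     "maintenance": ActionObject.WORK_ORDERS,
--
--     # EQUIPMENT
--     "equipment": ActionObject.EQUIPMENT,
--     "equip": ActionObject.EQUIPMENT,
--     "machine": ActionObject.EQUIPMENT,
--     "system": ActionObject.EQUIPMENT,
--     "engine": ActionObject.EQUIPMENT,
--     "generator": ActionObject.EQUIPMENT,
--
--     # PARTS
--     "part": ActionObject.PARTS,
--     "parts": ActionObject.PARTS,
--     "component": ActionObject.PARTS,
--     "components": ActionObject.PARTS,
--     "filter": ActionObject.PARTS,
--     "filters": ActionObject.PARTS,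
--
--     # FAULTS
--     "fault": ActionObject.FAULTS,
--     "faults": ActionObject.FAULTS,
--     "error": ActionObject.FAULTS,
--     "alarm": ActionObject.FAULTS,
--     "warning": ActionObject.FAULTS,
--
--     # DOCUMENTS
--     "document": ActionObject.DOCUMENTS,
--     "documents": ActionObject.DOCUMENTS,
--     "doc": ActionObject.DOCUMENTS,
--     "docs": ActionObject.DOCUMENTS,
--     "manual": ActionObject.DOCUMENTS,
--     "manuals": ActionObject.DOCUMENTS,
--     "procedure": ActionObject.DOCUMENTS,
--
--     # PURCHASE_ORDERS
--     "purchase order": ActionObject.PURCHASE_ORDERS,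
--     "purchase orders": ActionObject.PURCHASE_ORDERS,
--     "po": ActionObject.PURCHASE_ORDERS,
--     "order": ActionObject.PURCHASE_ORDERS,
--     "orders": ActionObject.PURCHASE_ORDERS,
--
--     # SUPPLIERS
--     "supplier": ActionObject.SUPPLIERS,
--     "suppliers": ActionObject.SUPPLIERS,
--     "vendor": ActionObject.SUPPLIERS,
--     "vendors": ActionObject.SUPPLIERS,
-- }
--
-- def _extract_object(text: str) -> Optional[ActionObject]:
--     """Extract object from text (longest match first)."""
--     sorted_patterns = sorted(
--         OBJECT_PATTERNS.items(),
--         key=lambda x: len(x[0]),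
--         reverse=True
--     )
--
--     for pattern, obj in sorted_patterns:
--         if pattern in text:
--             return obj
--
--     return None
-- ===== SOURCE B (Python) =====
-- from typing import Dict, List, Optional
-- from enum import Enum
--
-- class ActionObject(str, Enum):
--     INVENTORY = "inventory"
--     WORK_ORDERS = "work_orders"
--     EQUIPMENT = "equipment"
--     PARTS = "parts"
--     FAULTS = "faults"
--     DOCUMENTS = "documents"
--     PURCHASE_ORDERS = "purchase_orders"
--     SUPPLIERS = "suppliers"
--     LOGS = "logs"
--
-- # Patterns grouped per object (group order and within-group order = the
-- # original dict's insertion order, where groups were contiguous).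
-- OBJECT_PATTERN_GROUPS: List[tuple] = [
--     (ActionObject.INVENTORY, ["inventory", "inv", "stock", "spare", "spares"]),
--     (ActionObject.WORK_ORDERS, ["work order", "work orders", "wo", "task",
--                                 "tasks", "job", "jobs", "maintenance"]),
--     (ActionObject.EQUIPMENT, ["equipment", "equip", "machine", "system",
--                               "engine", "generator"]),
--     (ActionObject.PARTS, ["part", "parts", "component", "components",
--                           "filter", "filters"]),
--     (ActionObject.FAULTS, ["fault", "faults", "error", "alarm", "warning"]),
--     (ActionObject.DOCUMENTS, ["document", "documents", "doc", "docs",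
--                               "manual", "manuals", "procedure"]),
--     (ActionObject.PURCHASE_ORDERS, ["purchase order", "purchase orders",
--                                     "po", "order", "orders"]),
--     (ActionObject.SUPPLIERS, ["supplier", "suppliers", "vendor", "vendors"]),
-- ]
--
-- def _extract_object(text: str) -> Optional[ActionObject]:
--     """Extract object from text: no sort, one pass over per-object pattern
--     groups keeping the longest matching pattern seen so far (strict '>'
--     reproduces the stable descending sort's earliest-first tie-break)."""
--     best_obj = None
--     best_len = -1
--     for obj, patterns in OBJECT_PATTERN_GROUPS:
--         for p in patterns:
--             if len(p) > best_len and p in text: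
--                 best_obj = obj
--                 best_len = len(p)
--     return best_obj
-- ===== Notes on version B (the rewrite author's own statement) =====
-- stated objective: simpler
-- what changed: Replaced sort-then-first-match (sort all 46 patterns by length descending, return the first substring hit) by a sort-free single pass over patterns grouped per object, keeping the longest match so far; a strict length comparison in insertion order reproduces the stable sort's tie-break.
import Mathlib
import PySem

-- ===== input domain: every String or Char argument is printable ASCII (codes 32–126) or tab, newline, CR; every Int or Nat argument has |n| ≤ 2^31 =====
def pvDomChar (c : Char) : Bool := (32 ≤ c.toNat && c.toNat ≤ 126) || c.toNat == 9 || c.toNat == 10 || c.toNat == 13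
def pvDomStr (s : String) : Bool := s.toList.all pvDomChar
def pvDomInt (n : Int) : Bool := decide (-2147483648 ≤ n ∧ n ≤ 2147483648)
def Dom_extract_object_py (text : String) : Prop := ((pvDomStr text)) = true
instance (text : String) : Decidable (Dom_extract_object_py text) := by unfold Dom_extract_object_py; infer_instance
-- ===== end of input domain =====

-- B drops A's sort: one pass over patterns grouped per object, keeping the longest match so far (objective: simpler).

-- ===== PORT A =====
-- OBJECT_PATTERNS as an association list in insertion order; values are the str-Enum members' string values.
def pvOBJECT_PATTERNS : List (String × String) :=
  [("inventory", "inventory"), ("inv", "inventory"), ("stock", "inventory"),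
   ("spare", "inventory"), ("spares", "inventory"),
   ("work order", "work_orders"), ("work orders", "work_orders"), ("wo", "work_orders"),
   ("task", "work_orders"), ("tasks", "work_orders"), ("job", "work_orders"),
   ("jobs", "work_orders"), ("maintenance", "work_orders"),
   ("equipment", "equipment"), ("equip", "equipment"), ("machine", "equipment"),
   ("system", "equipment"), ("engine", "equipment"), ("generator", "equipment"),
   ("part", "parts"), ("parts", "parts"), ("component", "parts"),
   ("components", "parts"), ("filter", "parts"), ("filters", "parts"),
   ("fault", "faults"), ("faults", "faults"), ("error", "faults"),
   ("alarm", "faults"), ("warning", "faults"),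
   ("document", "documents"), ("documents", "documents"), ("doc", "documents"),
   ("docs", "documents"), ("manual", "documents"), ("manuals", "documents"),
   ("procedure", "documents"),
   ("purchase order", "purchase_orders"), ("purchase orders", "purchase_orders"),
   ("po", "purchase_orders"), ("order", "purchase_orders"), ("orders", "purchase_orders"),
   ("supplier", "suppliers"), ("suppliers", "suppliers"),
   ("vendor", "suppliers"), ("vendors", "suppliers")]

-- the 'for pattern, obj in sorted_patterns: if pattern in text: return obj' loop
def pvLoopA (text : String) : List (String × String) → Option String
  | [] => none
  | (pattern, obj) :: rest =>
      if PySem.Str.isIn pattern text then some obj else pvLoopA text rest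

def extract_object_py (text : String) : Option String :=
  let sorted_patterns := PySem.List.sorted pvOBJECT_PATTERNS (fun x => PySem.Str.len x.1) true
  pvLoopA text sorted_patterns

-- ===== PORT B =====
-- OBJECT_PATTERN_GROUPS: patterns grouped per object, in the original insertion order
def pvGROUPS : List (String × List String) :=
  [("inventory", ["inventory", "inv", "stock", "spare", "spares"]),
   ("work_orders", ["work order", "work orders", "wo", "task",
                    "tasks", "job", "jobs", "maintenance"]),
   ("equipment", ["equipment", "equip", "machine", "system",
                  "engine", "generator"]),
   ("parts", ["part", "parts", "component", "components",
              "filter", "filters"]),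
   ("faults", ["fault", "faults", "error", "alarm", "warning"]),
   ("documents", ["document", "documents", "doc", "docs",
                  "manual", "manuals", "procedure"]),
   ("purchase_orders", ["purchase order", "purchase orders",
                        "po", "order", "orders"]),
   ("suppliers", ["supplier", "suppliers", "vendor", "vendors"])]

-- the nested 'for obj, patterns: for p in patterns: if len(p) > best_len and p in text: …' pass
def extract_object_py_alt (text : String) : Option String :=
  (pvGROUPS.foldl
    (fun acc g =>
      g.2.foldl
        (fun acc p =>
          if decide (acc.2 < PySem.Str.len p) && PySem.Str.isIn p text
          then (some g.1, PySem.Str.len p) else acc)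
        acc)
    ((none : Option String), (-1 : Int))).1

-- ===== PRECONDITION & SPEC =====
def Spec_extract_object_py (text : String) (out : Option String) : Prop := out = extract_object_py_alt text
instance (text : String) (out : Option String) : Decidable (Spec_extract_object_py text out) := by unfold Spec_extract_object_py; infer_instance

-- ===== CLAIM (what is proved, stated in full; the proofs are below) =====
def Claim_equal_extract_object_py : Prop := ∀ (text : String), Dom_extract_object_py text → Spec_extract_object_py text (extract_object_py text)

-- ===== LEMMAS AND PROOFS =====

-- first matching (pattern, obj) pair, kept whole for the proofs
def pvFirst (m : String × String → Bool) : List (String × String) → Option (String × String)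
  | [] => none
  | x :: rest => if m x then some x else pvFirst m rest

lemma pvFirst_mem {m : String × String → Bool} {S : List (String × String)}
    {z : String × String} (h : pvFirst m S = some z) : z ∈ S := by
  induction S with
  | nil => simp [pvFirst] at h
  | cons y t ih =>
    by_cases hy : m y
    · simp [pvFirst, hy] at h; simp [h]
    · simp [pvFirst, hy] at h; exact List.mem_cons_of_mem _ (ih h)

lemma pvLoopA_eq (text : String) (S : List (String × String)) :
    pvLoopA text S = (pvFirst (fun p => PySem.Str.isIn p.1 text) S).map Prod.snd := by
  induction S with
  | nil => rfl
  | cons y t ih =>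
    obtain ⟨p, o⟩ := y
    simp only [pvLoopA, pvFirst, ih, apply_ite (Option.map Prod.snd), Option.map_some]

lemma pvFirst_insertBy (m : String × String → Bool) (x : String × String)
    (S : List (String × String))
    (hS : S.Pairwise (fun a b => PySem.Str.len b.1 ≤ PySem.Str.len a.1)) :
    pvFirst m (PySem.List.insertBy
        (fun a b => decide (PySem.Str.len b.1 < PySem.Str.len a.1)) x S) =
      match pvFirst m S with
      | none => if m x then some x else none
      | some z => if m x ∧ PySem.Str.len z.1 < PySem.Str.len x.1 then some x else some z := by
  induction S with
  | nil => by_cases hx : m x <;> simp [PySem.List.insertBy, pvFirst, hx]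
  | cons y t ih =>
    rcases List.pairwise_cons.mp hS with ⟨hyt, ht⟩
    have hstep2 : pvFirst m (y :: t) = if m y = true then some y else pvFirst m t := rfl
    by_cases hlt : PySem.Str.len y.1 < PySem.Str.len x.1
    · have hltN : y.1.length < x.1.length := by simpa [PySem.Str.len_eq] using hlt
      have hins : PySem.List.insertBy
          (fun a b => decide (PySem.Str.len b.1 < PySem.Str.len a.1)) x (y :: t) =
          x :: y :: t := by
        simp [PySem.List.insertBy, hltN]
      have hstep : pvFirst m (x :: y :: t) =
          if m x = true then some x else pvFirst m (y :: t) := rfl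
      rw [hins, hstep]
      cases hz : pvFirst m (y :: t) with
      | none => by_cases hx : m x <;> simp [hx]
      | some z =>
        have hzy : PySem.Str.len z.1 ≤ PySem.Str.len y.1 := by
          rcases List.mem_cons.mp (pvFirst_mem hz) with h | h
          · subst h; exact le_refl _
          · exact hyt z h
        have hlt' : z.1.length < x.1.length := by
          have := lt_of_le_of_lt hzy hlt
          simpa [PySem.Str.len_eq] using this
        by_cases hx : m x <;> simp [hx, hlt']
    · have hlt'' : ¬ y.1.length < x.1.length := by
        simpa [PySem.Str.len_eq] using hlt
      have hins : PySem.List.insertBy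
          (fun a b => decide (PySem.Str.len b.1 < PySem.Str.len a.1)) x (y :: t) =
          y :: PySem.List.insertBy
            (fun a b => decide (PySem.Str.len b.1 < PySem.Str.len a.1)) x t := by
        simp [PySem.List.insertBy, hlt'']
      have hstep : pvFirst m (y :: PySem.List.insertBy
          (fun a b => decide (PySem.Str.len b.1 < PySem.Str.len a.1)) x t) =
          if m y = true then some y else pvFirst m (PySem.List.insertBy
            (fun a b => decide (PySem.Str.len b.1 < PySem.Str.len a.1)) x t) := rfl
      rw [hins, hstep, hstep2, ih ht]
      by_cases hy : m y
      · simp [hy, hlt'']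
      · simp [hy]

-- the flat step function B's nested pass implements on (pattern, obj) pairs
def pvStep (m : String × String → Bool) (acc : Option String × Int) (po : String × String) :
    Option String × Int :=
  if decide (acc.2 < PySem.Str.len po.1) && m po
  then (some po.2, PySem.Str.len po.1) else acc

-- B's nested fold over groups = a flat fold over the flattened (pattern, obj) list
lemma pvNested_eq_flat (m : String × String → Bool) (gs : List (String × List String))
    (init : Option String × Int) :
    gs.foldl
      (fun acc g =>
        g.2.foldl
          (fun acc p =>
            if decide (acc.2 < PySem.Str.len p) && m (p, g.1)
            then (some g.1, PySem.Str.len p) else acc)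
          acc)
      init =
    (gs.flatMap (fun g => g.2.map (fun p => (p, g.1)))).foldl (pvStep m) init := by
  induction gs generalizing init with
  | nil => rfl
  | cons g t ih =>
    simp only [List.foldl_cons, List.flatMap_cons, List.foldl_append, ih, List.foldl_map]
    rfl

-- main invariant: A's first-match over the sorted list determines the flat fold state exactly
lemma pvMain (m : String × String → Bool) (l : List (String × String)) :
    l.foldl (pvStep m) ((none : Option String), (-1 : Int)) =
    match pvFirst m (PySem.List.sorted l (fun x => PySem.Str.len x.1) true) with
    | none => (none, -1)
    | some z => (some z.2, PySem.Str.len z.1) := by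
  induction l using List.reverseRecOn with
  | nil => simp [PySem.List.sorted]; rfl
  | append_singleton l x ih =>
    have hsorted : PySem.List.sorted (l ++ [x]) (fun p => PySem.Str.len p.1) true =
        PySem.List.insertBy (fun a b => decide (PySem.Str.len b.1 < PySem.Str.len a.1)) x
          (PySem.List.sorted l (fun p => PySem.Str.len p.1) true) := by
      rw [PySem.List.sorted_rev_eq_foldl_insertBy, PySem.List.sorted_rev_eq_foldl_insertBy,
        List.foldl_append]
      rfl
    have hpw := PySem.List.sorted_pairwise_rev l (fun p => PySem.Str.len p.1)
    have hins := pvFirst_insertBy m x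
      (PySem.List.sorted l (fun p => PySem.Str.len p.1) true) hpw
    rw [List.foldl_append, List.foldl_cons, List.foldl_nil, ih, hsorted, hins]
    cases hz : pvFirst m (PySem.List.sorted l (fun p => PySem.Str.len p.1) true) with
    | none =>
      by_cases hx : m x
      · have h1 : (-1 : Int) < (x.1.length : Int) := by omega
        simp [pvStep, hx, h1]
      · simp [pvStep, hx]
    | some z =>
      by_cases hx : m x
      · by_cases hlen : z.1.length < x.1.length
        · simp [pvStep, hx, hlen]
        · simp [pvStep, hx, hlen]
      · simp [pvStep, hx]

-- B's grouped table flattens to exactly A's insertion-order pattern list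
lemma pvFlatten_eq :
    pvGROUPS.flatMap (fun g => g.2.map (fun p => (p, g.1))) = pvOBJECT_PATTERNS := by
  decide

-- ===== VERDICT (by name: the statement is the Claim_ definition above) =====
theorem extract_object_py_spec : Claim_equal_extract_object_py := by
  intro text _
  show extract_object_py text = extract_object_py_alt text
  rw [extract_object_py, extract_object_py_alt, pvLoopA_eq,
    pvNested_eq_flat (fun p => PySem.Str.isIn p.1 text), pvFlatten_eq,
    pvMain (fun p => PySem.Str.isIn p.1 text) pvOBJECT_PATTERNS]
  cases pvFirst (fun p => PySem.Str.isIn p.1 text)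
      (PySem.List.sorted pvOBJECT_PATTERNS (fun x => PySem.Str.len x.1) true) with
  | none => rfl
  | some z => rfl
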